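-- pv_equiv track=rewrite | github.com/418704194/Course | message-in-DNA/PatternToNumber.py | PatternToNumber
-- ===== SOURCE A (Python) =====
-- def PatternToNumber(pattern):
-- 	num=0;
-- 	Len=len(pattern)
-- 	for i in range(0,Len):
-- 		index=0;
-- 		if (pattern[i]=="A") :
-- 			index=0
-- 		elif (pattern[i]=="C"):
-- 			index=1
-- 		elif (pattern[i]=="G"):
-- 			index=2
-- 		elif (pattern[i]=="T"):
-- 			index=3
-- 		num=num+index*(4**(Len-i-1))
-- 	return num
-- ===== SOURCE B (Python) =====
-- def PatternToNumber(pattern):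
--     digit = {'A': 0, 'C': 1, 'G': 2, 'T': 3}
--     num = 0
--     for c in pattern:
--         num = num * 4 + digit.get(c, 0)
--     return num
-- ===== Notes on version B (the rewrite author's own statement) =====
-- stated objective: faster
-- what changed: Replaces the per-position 4**(Len-i-1) power computation with a single left-to-right Horner accumulation num = num*4 + digit, using a dict lookup instead of an if/elif chain.
import Mathlib
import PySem

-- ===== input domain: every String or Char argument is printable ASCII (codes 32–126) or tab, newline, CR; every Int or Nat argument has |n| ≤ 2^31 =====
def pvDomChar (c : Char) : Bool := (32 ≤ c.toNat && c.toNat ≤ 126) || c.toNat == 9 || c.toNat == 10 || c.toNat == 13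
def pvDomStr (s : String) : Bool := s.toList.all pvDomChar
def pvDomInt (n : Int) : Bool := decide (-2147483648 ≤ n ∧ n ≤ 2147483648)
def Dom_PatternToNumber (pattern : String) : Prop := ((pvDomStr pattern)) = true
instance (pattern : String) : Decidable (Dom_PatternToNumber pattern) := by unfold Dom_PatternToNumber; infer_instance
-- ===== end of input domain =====

-- B replaces A's per-position power 4**(Len-i-1) with a single Horner pass num = num*4 + digit (faster in a timing run).

-- ===== PORT A =====
-- the if/elif chain computing `index` for pattern[i]
def pvIndexA (c : Char) : Int :=
  if c = 'A' then 0
  else if c = 'C' then 1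
  else if c = 'G' then 2
  else if c = 'T' then 3
  else 0

def PatternToNumber (pattern : String) : Int :=
  let L := pattern.toList
  let Len : Int := (L.length : Int)
  -- for i in range(0, Len): num = num + index * 4**(Len-i-1)
  -- pattern[i] via pyGetD: 0 ≤ i < Len in the loop, so in range; exponent Len-i-1 ≥ 0, so .toNat is exact
  (PySem.List.pyRange 0 Len 1).foldl
    (fun num i => num + pvIndexA (PySem.List.pyGetD L i ' ') * 4 ^ (Len - i - 1).toNat) 0

-- ===== PORT B =====
def PatternToNumber_alt (pattern : String) : Int :=
  let digit : PySem.Dict Char Int :=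
    ((((PySem.Dict.empty).insert 'A' 0).insert 'C' 1).insert 'G' 2).insert 'T' 3
  pattern.toList.foldl (fun num c => num * 4 + digit.getD c 0) 0

-- ===== PRECONDITION & SPEC =====
def Spec_PatternToNumber (pattern : String) (out : Int) : Prop := out = PatternToNumber_alt pattern
instance (pattern : String) (out : Int) : Decidable (Spec_PatternToNumber pattern out) := by unfold Spec_PatternToNumber; infer_instance

-- ===== CLAIM (what is proved, stated in full; the proofs are below) =====
def Claim_equal_PatternToNumber : Prop := ∀ (pattern : String), Dom_PatternToNumber pattern → Spec_PatternToNumber pattern (PatternToNumber pattern)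

-- ===== LEMMAS AND PROOFS =====

-- B's dict lookup computes the same digit as A's if/elif chain
lemma digit_getD_eq (c : Char) :
    (((((PySem.Dict.empty).insert 'A' 0).insert 'C' 1).insert 'G' 2).insert 'T' 3 :
      PySem.Dict Char Int).getD c 0 = pvIndexA c := by
  by_cases hA : c = 'A'
  · subst hA; decide
  by_cases hC : c = 'C'
  · subst hC; decide
  by_cases hG : c = 'G'
  · subst hG; decide
  by_cases hT : c = 'T'
  · subst hT; decide
  have hA' : ('A' == c) = false := beq_eq_false_iff_ne.mpr (Ne.symm hA)
  have hC' : ('C' == c) = false := beq_eq_false_iff_ne.mpr (Ne.symm hC)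
  have hG' : ('G' == c) = false := beq_eq_false_iff_ne.mpr (Ne.symm hG)
  have hT' : ('T' == c) = false := beq_eq_false_iff_ne.mpr (Ne.symm hT)
  simp [pvIndexA, PySem.Dict.getD, PySem.Dict.get?, PySem.Dict.insert, PySem.Dict.empty,
    List.find?, hA', hC', hG', hT', hA, hC, hG, hT]

-- foldl of a pure accumulation `acc + f x` is `init + sum of the mapped list`
lemma foldl_add_sum {α : Type} (f : α → Int) :
    ∀ (l : List α) (init : Int), l.foldl (fun acc x => acc + f x) init = init + (l.map f).sum := by
  intro l
  induction l with
  | nil => simp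
  | cons c t ih => intro init; simp [ih]; ring

-- Horner foldl with a general accumulator
lemma horner_foldl (f : Char → Int) :
    ∀ (l : List Char) (init : Int),
      l.foldl (fun num c => num * 4 + f c) init
        = init * 4 ^ l.length + l.foldl (fun num c => num * 4 + f c) 0 := by
  intro l
  induction l with
  | nil => simp
  | cons c t ih =>
      intro init
      simp only [List.foldl_cons, List.length_cons]
      rw [ih (init * 4 + f c), ih (0 * 4 + f c)]
      ring

-- the positional sum equals the Horner fold
lemma sum_eq_horner :
    ∀ (L : List Char),
      ((List.range L.length).map
        (fun k => pvIndexA (L.getD k ' ') * 4 ^ (L.length - 1 - k))).sum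
        = L.foldl (fun num c => num * 4 + pvIndexA c) 0 := by
  intro L
  induction L with
  | nil => simp
  | cons c t ih =>
      rw [List.foldl_cons, horner_foldl pvIndexA t (0 * 4 + pvIndexA c)]
      simp only [List.length_cons, List.range_succ_eq_map, List.map_cons, List.map_map,
        List.sum_cons, ← ih]
      have hmap : List.map ((fun k => pvIndexA ((c :: t).getD k ' ') * 4 ^ (t.length + 1 - 1 - k)) ∘ Nat.succ)
          (List.range t.length)
          = List.map (fun k => pvIndexA (t.getD k ' ') * 4 ^ (t.length - 1 - k)) (List.range t.length) := by
        refine List.map_congr_left fun k _ => ?_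
        simp only [Function.comp, List.getD_cons_succ]
        congr 2
        omega
      rw [hmap]
      simp only [List.getD_cons_zero, Nat.add_sub_cancel, Nat.sub_zero]
      ring

-- A's pyRange fold rewritten as the positional sum over List.range
lemma A_eq_sum (L : List Char) :
    (PySem.List.pyRange 0 (L.length : Int) 1).foldl
        (fun num i => num + pvIndexA (PySem.List.pyGetD L i ' ') * 4 ^ (((L.length : Int)) - i - 1).toNat) 0
      = ((List.range L.length).map
          (fun k => pvIndexA (L.getD k ' ') * 4 ^ (L.length - 1 - k))).sum := by
  rw [foldl_add_sum]
  rw [PySem.List.pyRange_one]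
  simp only [List.map_map, Int.sub_zero, Int.toNat_natCast]
  have hmap : List.map ((fun i => pvIndexA (PySem.List.pyGetD L i ' ') * 4 ^ (((L.length : Int)) - i - 1).toNat) ∘
        fun k : ℕ => (0 : Int) + k) (List.range L.length)
      = List.map (fun k => pvIndexA (L.getD k ' ') * 4 ^ (L.length - 1 - k)) (List.range L.length) := by
    refine List.map_congr_left fun k _ => ?_
    simp only [Function.comp, Int.zero_add, PySem.List.pyGetD_natCast]
    congr 2
    omega
  rw [hmap]
  simp

-- ===== VERDICT (by name: the statement is the Claim_ definition above) =====
theorem PatternToNumber_spec : Claim_equal_PatternToNumber := by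
  intro pattern _
  unfold Spec_PatternToNumber PatternToNumber PatternToNumber_alt
  simp only [digit_getD_eq]
  rw [A_eq_sum pattern.toList, sum_eq_horner]
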